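-- pv_equiv track=rewrite | github.com/BosengJ/algorithms_this_is_cote | 33_감시피하기.py | teacherWatchBFS
-- ===== SOURCE A (Python) =====
-- from collections import deque
--
-- def up(x,y,li):
--     while x > 0:
--         x -= 1
--         if li[x][y] == "S":
--             li[x][y] = "catch"
--         elif li[x][y] == "O":
--             break
--     return li
--
-- def down(x,y,li):
--     while x < len(li)-1:
--         x += 1
--         if li[x][y] == "S":
--             li[x][y] = "catch"
--         elif li[x][y] == "O":
--             break
--     return li
--
-- def left(x,y,li):
--     while y > 0:
--         y -= 1
--         if li[x][y] == "S":
--             li[x][y] = "catch"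
--         elif li[x][y] == "O":
--             break
--     return li
--
-- def right(x,y,li):
--     while y < len(li)-1:
--         y += 1
--         if li[x][y] == "S":
--             li[x][y] = "catch"
--         elif li[x][y] == "O":
--             break
--     return li
--
-- def teacherWatchBFS(li,n):
--     q = deque([])
--     for i in range(n):
--         for j in range(n):
--             if li[i][j] == "T":
--                 q.append([i,j])
--
--     while q:
--         x,y = q.popleft()
--         up(x,y,li)
--         down(x,y,li)
--         left(x,y,li)
--         right(x,y,li)
--
--     return li
-- ===== SOURCE B (Python) =====
-- # B: student-centric scan. For each cell that is a student ("S"), look outward in the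
-- # four directions for a watching teacher ("T" inside the n x n window), stopping at an
-- # obstacle ("O"); build and return a new grid (A mutates `li` in place and returns it --
-- # the equivalence is about the return value only).
--
-- def _seen(li, n, i, j):
--     """Is the student at (i, j) in the line of sight of some teacher in the n x n window?"""
--     for dx, dy in ((-1, 0), (1, 0), (0, -1), (0, 1)):
--         x, y = i + dx, j + dy
--         while 0 <= x < len(li) and 0 <= y < len(li[x]):
--             c = li[x][y]
--             if c == "T" and x < n and y < n:
--                 return True
--             if c == "O":
--                 break
--             x, y = x + dx, y + dy
--     return False
--
--
-- def teacherWatchBFS(li, n):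
--     return [["catch" if c == "S" and _seen(li, n, i, j) else c
--              for j, c in enumerate(row)]
--             for i, row in enumerate(li)]
-- ===== Notes on version B (the rewrite author's own statement) =====
-- stated objective: alternative
-- what changed: B iterates over student cells and scans outward from each student for a watching teacher (building a new grid), instead of A's queue of teachers ray-casting outward and mutating the grid in place; Pre_ excludes inputs where A raises IndexError (n > len(li), rows shorter than n inside the scan window, or rays leaving a ragged row) and, when a watched teacher exists, the remaining non-square grids, on which A's use of len(li) as the column bound is an accidental defensible-corner artefact.
import Mathlib
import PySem

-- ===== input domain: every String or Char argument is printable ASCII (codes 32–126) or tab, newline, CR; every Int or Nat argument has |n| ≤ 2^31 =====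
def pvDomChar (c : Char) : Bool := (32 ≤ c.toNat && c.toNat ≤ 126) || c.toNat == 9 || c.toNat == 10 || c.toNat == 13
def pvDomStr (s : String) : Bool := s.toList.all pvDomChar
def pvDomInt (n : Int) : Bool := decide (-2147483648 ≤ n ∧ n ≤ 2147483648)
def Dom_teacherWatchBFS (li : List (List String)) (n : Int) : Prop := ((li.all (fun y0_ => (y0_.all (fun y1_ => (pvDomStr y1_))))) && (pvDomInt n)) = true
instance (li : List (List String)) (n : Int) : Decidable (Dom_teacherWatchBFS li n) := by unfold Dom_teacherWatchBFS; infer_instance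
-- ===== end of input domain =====

-- B replaces A's teacher-queue ray-casting (mutating the grid) by a pure scan outward
-- from every student cell looking for a watching teacher; equivalence is about the
-- return value (A mutates `li` in place and returns it, B builds a new grid).

-- ===== PORT A =====
-- li[x][y] : exact via PySem.List.pyGet? wherever the Python indexing does not raise;
-- the .getD fallbacks are reached only on IndexError inputs, which Pre_ excludes.
def pvCell (li : List (List String)) (x y : Int) : String :=
  (PySem.List.pyGet? ((PySem.List.pyGet? li x).getD []) y).getD ""

-- li[x][y] = v ; A assigns only at indices 0 ≤ x,y in range, where .toNat is exact
def pvSet (li : List (List String)) (x y : Int) (v : String) : List (List String) :=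
  li.modify x.toNat (fun r => r.set y.toNat v)

-- termination measures of the four while-loops (cited by name in decreasing_by)
lemma pvDecUp {x : Int} (h : 0 < x) : (x - 1).toNat < x.toNat := by omega
lemma pvDecDown {a b : Int} (h : b < a - 1) : (a - 1 - (b + 1)).toNat < (a - 1 - b).toNat := by
  omega
lemma pvLenSet (li : List (List String)) (x y : Int) (v : String) :
    (li.modify x.toNat (fun r => r.set y.toNat v)).length = li.length := by
  simp

-- def up(x,y,li): while x > 0: x -= 1; mark "S" as "catch"; break on "O"
def pvUp (y x : Int) (li : List (List String)) : List (List String) :=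
  if h : 0 < x then
    if pvCell li (x - 1) y = "S" then pvUp y (x - 1) (pvSet li (x - 1) y "catch")
    else if pvCell li (x - 1) y = "O" then li
    else pvUp y (x - 1) li
  else li
termination_by x.toNat
decreasing_by all_goals exact pvDecUp h

-- def down(x,y,li): while x < len(li)-1 (len(li) is invariant under assignment)
def pvDown (y x : Int) (li : List (List String)) : List (List String) :=
  if h : x < (li.length : Int) - 1 then
    if pvCell li (x + 1) y = "S" then pvDown y (x + 1) (pvSet li (x + 1) y "catch")
    else if pvCell li (x + 1) y = "O" then li
    else pvDown y (x + 1) li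
  else li
termination_by ((li.length : Int) - 1 - x).toNat
decreasing_by
  · rw [pvSet, pvLenSet]; exact pvDecDown h
  · exact pvDecDown h

-- def left(x,y,li): while y > 0
def pvLeft (x y : Int) (li : List (List String)) : List (List String) :=
  if h : 0 < y then
    if pvCell li x (y - 1) = "S" then pvLeft x (y - 1) (pvSet li x (y - 1) "catch")
    else if pvCell li x (y - 1) = "O" then li
    else pvLeft x (y - 1) li
  else li
termination_by y.toNat
decreasing_by all_goals exact pvDecUp h

-- def right(x,y,li): while y < len(li)-1  (A's bound really is len(li), not the row length)
def pvRight (x y : Int) (li : List (List String)) : List (List String) :=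
  if h : y < (li.length : Int) - 1 then
    if pvCell li x (y + 1) = "S" then pvRight x (y + 1) (pvSet li x (y + 1) "catch")
    else if pvCell li x (y + 1) = "O" then li
    else pvRight x (y + 1) li
  else li
termination_by ((li.length : Int) - 1 - y).toNat
decreasing_by
  · rw [pvSet, pvLenSet]; exact pvDecDown h
  · exact pvDecDown h

-- collect the teachers of the n × n window in scan order (deque, FIFO), then ray-cast
def teacherWatchBFS (li : List (List String)) (n : Int) : List (List String) :=
  let q : List (Int × Int) :=
    (PySem.List.pyRange 0 n 1).foldl (fun acc i =>
      (PySem.List.pyRange 0 n 1).foldl (fun acc2 j =>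
        if pvCell li i j == "T" then acc2 ++ [(i, j)] else acc2) acc) []
  q.foldl (fun g p => pvRight p.1 p.2 (pvLeft p.1 p.2 (pvDown p.2 p.1 (pvUp p.2 p.1 g)))) li

-- ===== PORT B =====
def pvRowLen (li : List (List String)) (x : Int) : Int :=
  (((PySem.List.pyGet? li x).getD []).length : Int)

-- the body of B's while loop; fuel only bounds the iteration count (see pvFuel)
def pvSeenDir (li : List (List String)) (n dx dy : Int) : Int → Int → Nat → Bool
  | _, _, 0 => false
  | x, y, fuel + 1 =>
    if 0 ≤ x ∧ x < (li.length : Int) ∧ 0 ≤ y ∧ y < pvRowLen li x then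
      if pvCell li x y = "T" ∧ x < n ∧ y < n then true
      else if pvCell li x y = "O" then false
      else pvSeenDir li n dx dy (x + dx) (y + dy) fuel
    else false

-- every scan moves one coordinate monotonically and stops once it leaves
-- [0, len li) resp. [0, len row), so pvFuel li iterations always suffice
def pvFuel (li : List (List String)) : Nat :=
  li.length + li.foldr (fun r a => max r.length a) 0 + 1

def pvSeen (li : List (List String)) (n i j : Int) : Bool :=
  [((-1 : Int), (0 : Int)), (1, 0), (0, -1), (0, 1)].any fun d =>
    pvSeenDir li n d.1 d.2 (i + d.1) (j + d.2) (pvFuel li)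

def teacherWatchBFS_alt (li : List (List String)) (n : Int) : List (List String) :=
  (PySem.List.enumerate li).map fun p =>
    (PySem.List.enumerate p.2).map fun q =>
      if q.2 = "S" ∧ pvSeen li n p.1 q.1 = true then "catch" else q.2

-- ===== PRECONDITION & SPEC =====
-- cell value at Nat indices, "" when out of range (used by Pre_ and by the proofs)
def pvCellN (li : List (List String)) (i j : Nat) : String := (li.getD i []).getD j ""

-- Pre_ excludes inputs where A raises IndexError (n > len(li); a row of the n × n scan
-- window shorter than n; ragged rows a ray walks off) and, when a watched teacher exists,
-- the remaining non-square grids, on which A's use of len(li) as the column bound of its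
-- horizontal rays is an accidental, defensible-corner artefact.
def Pre_teacherWatchBFS (li : List (List String)) (n : Int) : Prop :=
  n ≤ (li.length : Int) ∧
  (∀ i : Nat, i < n.toNat → n.toNat ≤ (li.getD i []).length) ∧
  (∀ i : Nat, i < n.toNat → ∀ j : Nat, j < n.toNat → pvCellN li i j = "T" →
    ∀ r ∈ li, r.length = li.length)

instance (li : List (List String)) (n : Int) : Decidable (Pre_teacherWatchBFS li n) := by
  unfold Pre_teacherWatchBFS; infer_instance

def pvWitness_teacherWatchBFS : List (List String) × Int := ([["T", "S"], ["O", "S"]], 2)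

def Spec_teacherWatchBFS (li : List (List String)) (n : Int) (out : List (List String)) : Prop := out = teacherWatchBFS_alt li n
instance (li : List (List String)) (n : Int) (out : List (List String)) : Decidable (Spec_teacherWatchBFS li n out) := by unfold Spec_teacherWatchBFS; infer_instance

-- ===== CLAIM (what is proved, stated in full; the proofs are below) =====
def Claim_equal_teacherWatchBFS : Prop := ∀ (li : List (List String)) (n : Int), Dom_teacherWatchBFS li n → Pre_teacherWatchBFS li n → Spec_teacherWatchBFS li n (teacherWatchBFS li n)

-- ===== LEMMAS AND PROOFS =====

-- the teacher in the n × n window at (i, j), read off the original grid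
def pvTeach (li : List (List String)) (n : Int) (i j : Nat) : Prop :=
  pvCellN li i j = "T" ∧ (i : Int) < n ∧ (j : Int) < n

-- no obstacle strictly between rows a and b of column y / columns a and b of row x
def pvColClear (li : List (List String)) (y a b : Nat) : Prop :=
  ∀ k, a < k → k < b → pvCellN li k y ≠ "O"
def pvRowClear (li : List (List String)) (x a b : Nat) : Prop :=
  ∀ k, a < k → k < b → pvCellN li x k ≠ "O"

-- (i, j) is in the line of sight of some teacher of the n × n window
def pvVis (li : List (List String)) (n : Int) (i j : Nat) : Prop :=
  (∃ t, t < i ∧ pvTeach li n t j ∧ pvColClear li j t i) ∨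
  (∃ t, i < t ∧ t < li.length ∧ pvTeach li n t j ∧ pvColClear li j i t) ∨
  (∃ t, t < j ∧ pvTeach li n i t ∧ pvRowClear li i t j) ∨
  (∃ t, j < t ∧ t < li.length ∧ pvTeach li n i t ∧ pvRowClear li i j t)

-- g is li with some visible students already marked
def pvRel (li : List (List String)) (n : Int) (g : List (List String)) : Prop :=
  g.length = li.length ∧
  (∀ i, (g.getD i []).length = (li.getD i []).length) ∧
  (∀ i j, pvCellN g i j = pvCellN li i j ∨
    (pvCellN li i j = "S" ∧ pvVis li n i j ∧ pvCellN g i j = "catch"))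

def pvMono (g g' : List (List String)) : Prop :=
  ∀ i j, pvCellN g i j = "catch" → pvCellN g' i j = "catch"

lemma pvCell_natCast (li : List (List String)) (i j : Nat) :
    pvCell li (i : Int) (j : Int) = pvCellN li i j := by
  simp [pvCell, pvCellN, List.getD_eq_getElem?_getD]

lemma pvCellN_bounds (li : List (List String)) (i j : Nat) (h : pvCellN li i j ≠ "") :
    i < li.length ∧ j < (li.getD i []).length := by
  constructor
  · by_contra hc
    apply h
    simp [pvCellN, List.getD_eq_getElem?_getD, List.getElem?_eq_none (by omega : li.length ≤ i)]
  · by_contra hc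
    exact h (List.getD_eq_default _ _ (by omega))

lemma pvCellN_out (li : List (List String)) (i j : Nat)
    (h : ¬(i < li.length ∧ j < (li.getD i []).length)) : pvCellN li i j = "" := by
  by_contra hc
  exact h (pvCellN_bounds li i j hc)

lemma length_pvSet (li : List (List String)) (x y : Int) (v : String) :
    (pvSet li x y v).length = li.length := by
  simp [pvSet]

lemma rowlen_pvSet (li : List (List String)) (x y : Int) (v : String) (i : Nat) :
    ((pvSet li x y v).getD i []).length = (li.getD i []).length := by
  rcases h : li[i]? with _ | r
  · simp [pvSet, List.getD_eq_getElem?_getD, List.getElem?_modify, h]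
  · simp only [pvSet, List.getD_eq_getElem?_getD, List.getElem?_modify, h]
    split <;> simp [List.length_set]

lemma pvCellN_pvSet_ne (li : List (List String)) (x y : Nat) (v : String) (i j : Nat)
    (h : i ≠ x ∨ j ≠ y) :
    pvCellN (pvSet li (x : Int) (y : Int) v) i j = pvCellN li i j := by
  rcases hr : li[i]? with _ | r
  · simp [pvCellN, pvSet, List.getD_eq_getElem?_getD, List.getElem?_modify, hr]
  · simp only [pvCellN, pvSet, List.getD_eq_getElem?_getD, List.getElem?_modify,
      Int.toNat_natCast, hr]
    by_cases hix : x = i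
    · subst hix
      rcases h with h | h
      · omega
      · simp [Ne.symm h]
    · simp [hix]

lemma pvCellN_pvSet_eq (li : List (List String)) (x y : Nat) (v : String)
    (hx : x < li.length) (hy : y < (li.getD x []).length) :
    pvCellN (pvSet li (x : Int) (y : Int) v) x y = v := by
  have hr : li[x]? = some li[x] := List.getElem?_eq_getElem hx
  have hy' : y < li[x].length := by
    have hgd : li.getD x [] = li[x] := by simp [List.getD_eq_getElem?_getD, hr]
    rw [← hgd]; exact hy
  simp [pvCellN, pvSet, List.getD_eq_getElem?_getD, hr, hy']

lemma pvGridExt (g h : List (List String)) (hl : g.length = h.length)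
    (hr : ∀ i, (g.getD i []).length = (h.getD i []).length)
    (hc : ∀ i j, pvCellN g i j = pvCellN h i j) : g = h := by
  apply List.ext_getElem hl
  intro i h1 h2
  have hgr : g.getD i [] = g[i] := by
    simp [List.getD_eq_getElem?_getD, List.getElem?_eq_getElem h1]
  have hhr : h.getD i [] = h[i] := by
    simp [List.getD_eq_getElem?_getD, List.getElem?_eq_getElem h2]
  apply List.ext_getElem
  · have := hr i; rw [hgr, hhr] at this; exact this
  · intro j j1 j2
    have := hc i j
    simp only [pvCellN, hgr, hhr, List.getD_eq_getElem?_getD,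
      List.getElem?_eq_getElem j1, List.getElem?_eq_getElem j2, Option.getD_some] at this
    exact this

lemma pvRel_refl (li : List (List String)) (n : Int) : pvRel li n li :=
  ⟨rfl, fun _ => rfl, fun _ _ => Or.inl rfl⟩

lemma pvRel_O (li : List (List String)) (n : Int) (g : List (List String))
    (h : pvRel li n g) (i j : Nat) : pvCellN g i j = "O" ↔ pvCellN li i j = "O" := by
  rcases h.2.2 i j with h1 | ⟨hS, _, hC⟩
  · rw [h1]
  · rw [hC, hS]; constructor <;> intro hh <;> simp at hh

lemma pvRel_S (li : List (List String)) (n : Int) (g : List (List String))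
    (h : pvRel li n g) (i j : Nat) (hg : pvCellN g i j = "S") : pvCellN li i j = "S" := by
  rcases h.2.2 i j with h1 | ⟨hS, _, hC⟩
  · rw [← h1, hg]
  · rw [hg] at hC; simp at hC

lemma pvTeach_bounds (li : List (List String)) (n : Int) (tx ty : Nat)
    (ht : pvTeach li n tx ty) : tx < li.length ∧ ty < (li.getD tx []).length := by
  apply pvCellN_bounds
  rw [ht.1]; simp

lemma pvRowLen_sq (li : List (List String)) (hsq : ∀ r ∈ li, r.length = li.length)
    (x : Nat) (hx : x < li.length) : (li.getD x []).length = li.length := by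
  have : li.getD x [] = li[x] := by
    simp [List.getD_eq_getElem?_getD, List.getElem?_eq_getElem hx]
  rw [this]
  exact hsq _ (List.getElem_mem hx)

-- ---------- the four ray lemmas for A ----------

lemma pvUp_spec (li : List (List String)) (n : Int)
    (hsq : ∀ r ∈ li, r.length = li.length) (tx ty : Nat) (ht : pvTeach li n tx ty) :
    ∀ (x : Nat) (g : List (List String)), x ≤ tx → pvRel li n g →
      (∀ k, x ≤ k → k < tx → pvCellN li k ty ≠ "O") →
      pvRel li n (pvUp (ty : Int) (x : Int) g) ∧ pvMono g (pvUp (ty : Int) (x : Int) g) ∧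
      (∀ k, k < x → (∀ r, k < r → r < x → pvCellN li r ty ≠ "O") →
        pvCellN li k ty = "S" → pvCellN (pvUp (ty : Int) (x : Int) g) k ty = "catch") := by
  have hm : tx < li.length := (pvTeach_bounds li n tx ty ht).1
  have hym : ty < li.length := by
    have := (pvTeach_bounds li n tx ty ht).2
    rwa [pvRowLen_sq li hsq tx hm] at this
  intro x
  induction x with
  | zero =>
    intro g _ hg _
    have hstop : pvUp (ty : Int) ((0 : Nat) : Int) g = g := by
      rw [pvUp, dif_neg (by omega)]
    rw [hstop]
    exact ⟨hg, fun _ _ h => h, fun k hk => absurd hk (by omega)⟩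
  | succ x ih =>
    intro g hx hg hcl
    have hlt : x < tx := by omega
    have hxm : x < li.length := by omega
    have hxrow : ty < (li.getD x []).length := by
      rw [pvRowLen_sq li hsq x hxm]; exact hym
    have hgb : x < g.length := by rw [hg.1]; exact hxm
    have hgrow : ty < (g.getD x []).length := by rw [hg.2.1 x]; exact hxrow
    have hcast : (((x + 1 : Nat) : Int)) - 1 = (x : Int) := by push_cast; ring
    rw [pvUp, dif_pos (by push_cast; omega), hcast]
    by_cases hS : pvCellN g x ty = "S"
    · rw [if_pos (by rw [pvCell_natCast]; exact hS)]
      have hliS : pvCellN li x ty = "S" := pvRel_S li n g hg x ty hS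
      have hvis : pvVis li n x ty :=
        Or.inr (Or.inl ⟨tx, hlt, hm, ht, fun k hk1 hk2 => hcl k (by omega) hk2⟩)
      have hg' : pvRel li n (pvSet g (x : Int) (ty : Int) "catch") := by
        refine ⟨by rw [length_pvSet]; exact hg.1,
          fun i => by rw [rowlen_pvSet]; exact hg.2.1 i, fun i j => ?_⟩
        by_cases hij : i = x ∧ j = ty
        · rcases hij with ⟨rfl, rfl⟩
          right
          exact ⟨hliS, hvis, pvCellN_pvSet_eq g _ _ "catch" hgb hgrow⟩
        · rw [pvCellN_pvSet_ne g x ty "catch" i j (by tauto)]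
          exact hg.2.2 i j
      have hcl' : ∀ k, x ≤ k → k < tx → pvCellN li k ty ≠ "O" := by
        intro k hk1 hk2
        rcases Nat.eq_or_lt_of_le hk1 with rfl | hk
        · rw [hliS]; simp
        · exact hcl k (by omega) hk2
      obtain ⟨r1, r2, r3⟩ := ih (pvSet g (x : Int) (ty : Int) "catch") (by omega) hg' hcl'
      have hmset : pvMono g (pvSet g (x : Int) (ty : Int) "catch") := by
        intro i j hc
        by_cases hij : i = x ∧ j = ty
        · rcases hij with ⟨rfl, rfl⟩
          exact pvCellN_pvSet_eq g _ _ "catch" hgb hgrow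
        · rw [pvCellN_pvSet_ne g x ty "catch" i j (by tauto)]; exact hc
      refine ⟨r1, fun i j hc => r2 i j (hmset i j hc), ?_⟩
      intro k hk hkcl hkS
      rcases Nat.lt_succ_iff_lt_or_eq.mp hk with hk' | rfl
      · exact r3 k hk' (fun r hr1 hr2 => hkcl r hr1 (by omega)) hkS
      · exact r2 k ty (pvCellN_pvSet_eq g k ty "catch" hgb hgrow)
    · rw [if_neg (by rw [pvCell_natCast]; exact hS)]
      by_cases hO : pvCellN g x ty = "O"
      · rw [if_pos (by rw [pvCell_natCast]; exact hO)]
        have hliO : pvCellN li x ty = "O" := (pvRel_O li n g hg x ty).mp hO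
        refine ⟨hg, fun _ _ h => h, ?_⟩
        intro k hk hkcl hkS
        rcases Nat.lt_succ_iff_lt_or_eq.mp hk with hk' | rfl
        · exact absurd hliO (hkcl x hk' (by omega))
        · rw [hliO] at hkS; simp at hkS
      · rw [if_neg (by rw [pvCell_natCast]; exact hO)]
        have hliNO : pvCellN li x ty ≠ "O" := fun h => hO ((pvRel_O li n g hg x ty).mpr h)
        have hcl' : ∀ k, x ≤ k → k < tx → pvCellN li k ty ≠ "O" := by
          intro k hk1 hk2
          rcases Nat.eq_or_lt_of_le hk1 with rfl | hk
          · exact hliNO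
          · exact hcl k (by omega) hk2
        obtain ⟨r1, r2, r3⟩ := ih g (by omega) hg hcl'
        refine ⟨r1, r2, ?_⟩
        intro k hk hkcl hkS
        rcases Nat.lt_succ_iff_lt_or_eq.mp hk with hk' | rfl
        · exact r3 k hk' (fun r hr1 hr2 => hkcl r hr1 (by omega)) hkS
        · rcases hg.2.2 k ty with h1 | ⟨_, _, hC⟩
          · rw [hkS] at h1; exact absurd h1 hS
          · exact r2 k ty hC

lemma pvDown_spec (li : List (List String)) (n : Int)
    (hsq : ∀ r ∈ li, r.length = li.length) (tx ty : Nat) (ht : pvTeach li n tx ty) :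
    ∀ (d x : Nat) (g : List (List String)), li.length - 1 - x ≤ d → tx ≤ x → pvRel li n g →
      (∀ k, tx < k → k ≤ x → pvCellN li k ty ≠ "O") →
      pvRel li n (pvDown (ty : Int) (x : Int) g) ∧ pvMono g (pvDown (ty : Int) (x : Int) g) ∧
      (∀ k, x < k → k < li.length → (∀ r, x < r → r < k → pvCellN li r ty ≠ "O") →
        pvCellN li k ty = "S" → pvCellN (pvDown (ty : Int) (x : Int) g) k ty = "catch") := by
  have hm : tx < li.length := (pvTeach_bounds li n tx ty ht).1
  have hym : ty < li.length := by
    have := (pvTeach_bounds li n tx ty ht).2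
    rwa [pvRowLen_sq li hsq tx hm] at this
  intro d
  induction d with
  | zero =>
    intro x g hd _ hg _
    have hstop : pvDown (ty : Int) (x : Int) g = g := by
      rw [pvDown, dif_neg (by rw [hg.1]; omega)]
    rw [hstop]
    exact ⟨hg, fun _ _ h => h, fun k hk1 hk2 => absurd hk2 (by omega)⟩
  | succ d ih =>
    intro x g hd hx hg hcl
    by_cases hcond : x + 1 < li.length
    · have hxm : x + 1 < li.length := hcond
      have hxrow : ty < (li.getD (x + 1) []).length := by
        rw [pvRowLen_sq li hsq (x + 1) hxm]; exact hym
      have hgb : x + 1 < g.length := by rw [hg.1]; exact hxm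
      have hgrow : ty < (g.getD (x + 1) []).length := by rw [hg.2.1 (x + 1)]; exact hxrow
      have hcast : ((x : Int)) + 1 = ((x + 1 : Nat) : Int) := by push_cast; ring
      rw [pvDown, dif_pos (by rw [hg.1]; omega), hcast]
      by_cases hS : pvCellN g (x + 1) ty = "S"
      · rw [if_pos (by rw [pvCell_natCast]; exact hS)]
        have hliS : pvCellN li (x + 1) ty = "S" := pvRel_S li n g hg (x + 1) ty hS
        have hvis : pvVis li n (x + 1) ty :=
          Or.inl ⟨tx, by omega, ht, fun k hk1 hk2 => hcl k hk1 (by omega)⟩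
        have hg' : pvRel li n (pvSet g ((x + 1 : Nat) : Int) (ty : Int) "catch") := by
          refine ⟨by rw [length_pvSet]; exact hg.1,
            fun i => by rw [rowlen_pvSet]; exact hg.2.1 i, fun i j => ?_⟩
          by_cases hij : i = x + 1 ∧ j = ty
          · rcases hij with ⟨rfl, rfl⟩
            right
            exact ⟨hliS, hvis, pvCellN_pvSet_eq g _ _ "catch" hgb hgrow⟩
          · rw [pvCellN_pvSet_ne g (x + 1) ty "catch" i j (by tauto)]
            exact hg.2.2 i j
        have hcl' : ∀ k, tx < k → k ≤ x + 1 → pvCellN li k ty ≠ "O" := by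
          intro k hk1 hk2
          rcases Nat.eq_or_lt_of_le hk2 with rfl | hk
          · rw [hliS]; simp
          · exact hcl k hk1 (by omega)
        obtain ⟨r1, r2, r3⟩ :=
          ih (x + 1) (pvSet g ((x + 1 : Nat) : Int) (ty : Int) "catch") (by omega) (by omega) hg' hcl'
        have hmset : pvMono g (pvSet g ((x + 1 : Nat) : Int) (ty : Int) "catch") := by
          intro i j hc
          by_cases hij : i = x + 1 ∧ j = ty
          · rcases hij with ⟨rfl, rfl⟩
            exact pvCellN_pvSet_eq g _ _ "catch" hgb hgrow
          · rw [pvCellN_pvSet_ne g (x + 1) ty "catch" i j (by tauto)]; exact hc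
        refine ⟨r1, fun i j hc => r2 i j (hmset i j hc), ?_⟩
        intro k hk1 hk2 hkcl hkS
        rcases Nat.eq_or_lt_of_le (by omega : x + 1 ≤ k) with rfl | hk
        · exact r2 (x + 1) ty (pvCellN_pvSet_eq g (x + 1) ty "catch" hgb hgrow)
        · exact r3 k (by omega) hk2 (fun r hr1 hr2 => hkcl r (by omega) hr2) hkS
      · rw [if_neg (by rw [pvCell_natCast]; exact hS)]
        by_cases hO : pvCellN g (x + 1) ty = "O"
        · rw [if_pos (by rw [pvCell_natCast]; exact hO)]
          have hliO : pvCellN li (x + 1) ty = "O" := (pvRel_O li n g hg (x + 1) ty).mp hO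
          refine ⟨hg, fun _ _ h => h, ?_⟩
          intro k hk1 hk2 hkcl hkS
          rcases Nat.eq_or_lt_of_le (by omega : x + 1 ≤ k) with rfl | hk
          · rw [hliO] at hkS; simp at hkS
          · exact absurd hliO (hkcl (x + 1) (by omega) hk)
        · rw [if_neg (by rw [pvCell_natCast]; exact hO)]
          have hliNO : pvCellN li (x + 1) ty ≠ "O" := fun h =>
            hO ((pvRel_O li n g hg (x + 1) ty).mpr h)
          have hcl' : ∀ k, tx < k → k ≤ x + 1 → pvCellN li k ty ≠ "O" := by
            intro k hk1 hk2
            rcases Nat.eq_or_lt_of_le hk2 with rfl | hk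
            · exact hliNO
            · exact hcl k hk1 (by omega)
          obtain ⟨r1, r2, r3⟩ := ih (x + 1) g (by omega) (by omega) hg hcl'
          refine ⟨r1, r2, ?_⟩
          intro k hk1 hk2 hkcl hkS
          rcases Nat.eq_or_lt_of_le (by omega : x + 1 ≤ k) with rfl | hk
          · rcases hg.2.2 (x + 1) ty with h1 | ⟨_, _, hC⟩
            · rw [hkS] at h1; exact absurd h1 hS
            · exact r2 (x + 1) ty hC
          · exact r3 k (by omega) hk2 (fun r hr1 hr2 => hkcl r (by omega) hr2) hkS
    · have hstop : pvDown (ty : Int) (x : Int) g = g := by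
        rw [pvDown, dif_neg (by rw [hg.1]; omega)]
      rw [hstop]
      exact ⟨hg, fun _ _ h => h, fun k hk1 hk2 => absurd hk2 (by omega)⟩

lemma pvLeft_spec (li : List (List String)) (n : Int)
    (hsq : ∀ r ∈ li, r.length = li.length) (tx ty : Nat) (ht : pvTeach li n tx ty) :
    ∀ (y : Nat) (g : List (List String)), y ≤ ty → pvRel li n g →
      (∀ k, y ≤ k → k < ty → pvCellN li tx k ≠ "O") →
      pvRel li n (pvLeft (tx : Int) (y : Int) g) ∧ pvMono g (pvLeft (tx : Int) (y : Int) g) ∧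
      (∀ k, k < y → (∀ r, k < r → r < y → pvCellN li tx r ≠ "O") →
        pvCellN li tx k = "S" → pvCellN (pvLeft (tx : Int) (y : Int) g) tx k = "catch") := by
  have hm : tx < li.length := (pvTeach_bounds li n tx ty ht).1
  have hrow : (li.getD tx []).length = li.length := pvRowLen_sq li hsq tx hm
  have hym : ty < li.length := by
    have := (pvTeach_bounds li n tx ty ht).2; omega
  intro y
  induction y with
  | zero =>
    intro g _ hg _
    have hstop : pvLeft (tx : Int) ((0 : Nat) : Int) g = g := by
      rw [pvLeft, dif_neg (by omega)]
    rw [hstop]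
    exact ⟨hg, fun _ _ h => h, fun k hk => absurd hk (by omega)⟩
  | succ y ih =>
    intro g hy hg hcl
    have hlt : y < ty := by omega
    have hyml : y < li.length := by omega
    have hxrow : y < (li.getD tx []).length := by omega
    have hgb : tx < g.length := by rw [hg.1]; exact hm
    have hgrow : y < (g.getD tx []).length := by rw [hg.2.1 tx]; exact hxrow
    have hcast : (((y + 1 : Nat) : Int)) - 1 = (y : Int) := by push_cast; ring
    rw [pvLeft, dif_pos (by push_cast; omega), hcast]
    by_cases hS : pvCellN g tx y = "S"
    · rw [if_pos (by rw [pvCell_natCast]; exact hS)]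
      have hliS : pvCellN li tx y = "S" := pvRel_S li n g hg tx y hS
      have hvis : pvVis li n tx y :=
        Or.inr (Or.inr (Or.inr ⟨ty, hlt, hym, ht, fun k hk1 hk2 => hcl k (by omega) hk2⟩))
      have hg' : pvRel li n (pvSet g (tx : Int) (y : Int) "catch") := by
        refine ⟨by rw [length_pvSet]; exact hg.1,
          fun i => by rw [rowlen_pvSet]; exact hg.2.1 i, fun i j => ?_⟩
        by_cases hij : i = tx ∧ j = y
        · rcases hij with ⟨rfl, rfl⟩
          right
          exact ⟨hliS, hvis, pvCellN_pvSet_eq g _ _ "catch" hgb hgrow⟩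
        · rw [pvCellN_pvSet_ne g tx y "catch" i j (by tauto)]
          exact hg.2.2 i j
      have hcl' : ∀ k, y ≤ k → k < ty → pvCellN li tx k ≠ "O" := by
        intro k hk1 hk2
        rcases Nat.eq_or_lt_of_le hk1 with rfl | hk
        · rw [hliS]; simp
        · exact hcl k (by omega) hk2
      obtain ⟨r1, r2, r3⟩ := ih (pvSet g (tx : Int) (y : Int) "catch") (by omega) hg' hcl'
      have hmset : pvMono g (pvSet g (tx : Int) (y : Int) "catch") := by
        intro i j hc
        by_cases hij : i = tx ∧ j = y
        · rcases hij with ⟨rfl, rfl⟩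
          exact pvCellN_pvSet_eq g _ _ "catch" hgb hgrow
        · rw [pvCellN_pvSet_ne g tx y "catch" i j (by tauto)]; exact hc
      refine ⟨r1, fun i j hc => r2 i j (hmset i j hc), ?_⟩
      intro k hk hkcl hkS
      rcases Nat.lt_succ_iff_lt_or_eq.mp hk with hk' | rfl
      · exact r3 k hk' (fun r hr1 hr2 => hkcl r hr1 (by omega)) hkS
      · exact r2 tx k (pvCellN_pvSet_eq g tx k "catch" hgb hgrow)
    · rw [if_neg (by rw [pvCell_natCast]; exact hS)]
      by_cases hO : pvCellN g tx y = "O"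
      · rw [if_pos (by rw [pvCell_natCast]; exact hO)]
        have hliO : pvCellN li tx y = "O" := (pvRel_O li n g hg tx y).mp hO
        refine ⟨hg, fun _ _ h => h, ?_⟩
        intro k hk hkcl hkS
        rcases Nat.lt_succ_iff_lt_or_eq.mp hk with hk' | rfl
        · exact absurd hliO (hkcl y hk' (by omega))
        · rw [hliO] at hkS; simp at hkS
      · rw [if_neg (by rw [pvCell_natCast]; exact hO)]
        have hliNO : pvCellN li tx y ≠ "O" := fun h => hO ((pvRel_O li n g hg tx y).mpr h)
        have hcl' : ∀ k, y ≤ k → k < ty → pvCellN li tx k ≠ "O" := by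
          intro k hk1 hk2
          rcases Nat.eq_or_lt_of_le hk1 with rfl | hk
          · exact hliNO
          · exact hcl k (by omega) hk2
        obtain ⟨r1, r2, r3⟩ := ih g (by omega) hg hcl'
        refine ⟨r1, r2, ?_⟩
        intro k hk hkcl hkS
        rcases Nat.lt_succ_iff_lt_or_eq.mp hk with hk' | rfl
        · exact r3 k hk' (fun r hr1 hr2 => hkcl r hr1 (by omega)) hkS
        · rcases hg.2.2 tx k with h1 | ⟨_, _, hC⟩
          · rw [hkS] at h1; exact absurd h1 hS
          · exact r2 tx k hC

lemma pvRight_spec (li : List (List String)) (n : Int)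
    (hsq : ∀ r ∈ li, r.length = li.length) (tx ty : Nat) (ht : pvTeach li n tx ty) :
    ∀ (d y : Nat) (g : List (List String)), li.length - 1 - y ≤ d → ty ≤ y → pvRel li n g →
      (∀ k, ty < k → k ≤ y → pvCellN li tx k ≠ "O") →
      pvRel li n (pvRight (tx : Int) (y : Int) g) ∧ pvMono g (pvRight (tx : Int) (y : Int) g) ∧
      (∀ k, y < k → k < li.length → (∀ r, y < r → r < k → pvCellN li tx r ≠ "O") →
        pvCellN li tx k = "S" → pvCellN (pvRight (tx : Int) (y : Int) g) tx k = "catch") := by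
  have hm : tx < li.length := (pvTeach_bounds li n tx ty ht).1
  have hrow : (li.getD tx []).length = li.length := pvRowLen_sq li hsq tx hm
  intro d
  induction d with
  | zero =>
    intro y g hd _ hg _
    have hstop : pvRight (tx : Int) (y : Int) g = g := by
      rw [pvRight, dif_neg (by rw [hg.1]; omega)]
    rw [hstop]
    exact ⟨hg, fun _ _ h => h, fun k hk1 hk2 => absurd hk2 (by omega)⟩
  | succ d ih =>
    intro y g hd hy hg hcl
    by_cases hcond : y + 1 < li.length
    · have hxrow : y + 1 < (li.getD tx []).length := by omega
      have hgb : tx < g.length := by rw [hg.1]; exact hm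
      have hgrow : y + 1 < (g.getD tx []).length := by rw [hg.2.1 tx]; exact hxrow
      have hcast : ((y : Int)) + 1 = ((y + 1 : Nat) : Int) := by push_cast; ring
      rw [pvRight, dif_pos (by rw [hg.1]; omega), hcast]
      by_cases hS : pvCellN g tx (y + 1) = "S"
      · rw [if_pos (by rw [pvCell_natCast]; exact hS)]
        have hliS : pvCellN li tx (y + 1) = "S" := pvRel_S li n g hg tx (y + 1) hS
        have hvis : pvVis li n tx (y + 1) :=
          Or.inr (Or.inr (Or.inl ⟨ty, by omega, ht, fun k hk1 hk2 => hcl k hk1 (by omega)⟩))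
        have hg' : pvRel li n (pvSet g (tx : Int) ((y + 1 : Nat) : Int) "catch") := by
          refine ⟨by rw [length_pvSet]; exact hg.1,
            fun i => by rw [rowlen_pvSet]; exact hg.2.1 i, fun i j => ?_⟩
          by_cases hij : i = tx ∧ j = y + 1
          · rcases hij with ⟨rfl, rfl⟩
            right
            exact ⟨hliS, hvis, pvCellN_pvSet_eq g _ _ "catch" hgb hgrow⟩
          · rw [pvCellN_pvSet_ne g tx (y + 1) "catch" i j (by tauto)]
            exact hg.2.2 i j
        have hcl' : ∀ k, ty < k → k ≤ y + 1 → pvCellN li tx k ≠ "O" := by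
          intro k hk1 hk2
          rcases Nat.eq_or_lt_of_le hk2 with rfl | hk
          · rw [hliS]; simp
          · exact hcl k hk1 (by omega)
        obtain ⟨r1, r2, r3⟩ :=
          ih (y + 1) (pvSet g (tx : Int) ((y + 1 : Nat) : Int) "catch") (by omega) (by omega) hg' hcl'
        have hmset : pvMono g (pvSet g (tx : Int) ((y + 1 : Nat) : Int) "catch") := by
          intro i j hc
          by_cases hij : i = tx ∧ j = y + 1
          · rcases hij with ⟨rfl, rfl⟩
            exact pvCellN_pvSet_eq g _ _ "catch" hgb hgrow
          · rw [pvCellN_pvSet_ne g tx (y + 1) "catch" i j (by tauto)]; exact hc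
        refine ⟨r1, fun i j hc => r2 i j (hmset i j hc), ?_⟩
        intro k hk1 hk2 hkcl hkS
        rcases Nat.eq_or_lt_of_le (by omega : y + 1 ≤ k) with rfl | hk
        · exact r2 tx (y + 1) (pvCellN_pvSet_eq g tx (y + 1) "catch" hgb hgrow)
        · exact r3 k (by omega) hk2 (fun r hr1 hr2 => hkcl r (by omega) hr2) hkS
      · rw [if_neg (by rw [pvCell_natCast]; exact hS)]
        by_cases hO : pvCellN g tx (y + 1) = "O"
        · rw [if_pos (by rw [pvCell_natCast]; exact hO)]
          have hliO : pvCellN li tx (y + 1) = "O" := (pvRel_O li n g hg tx (y + 1)).mp hO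
          refine ⟨hg, fun _ _ h => h, ?_⟩
          intro k hk1 hk2 hkcl hkS
          rcases Nat.eq_or_lt_of_le (by omega : y + 1 ≤ k) with rfl | hk
          · rw [hliO] at hkS; simp at hkS
          · exact absurd hliO (hkcl (y + 1) (by omega) hk)
        · rw [if_neg (by rw [pvCell_natCast]; exact hO)]
          have hliNO : pvCellN li tx (y + 1) ≠ "O" := fun h =>
            hO ((pvRel_O li n g hg tx (y + 1)).mpr h)
          have hcl' : ∀ k, ty < k → k ≤ y + 1 → pvCellN li tx k ≠ "O" := by
            intro k hk1 hk2
            rcases Nat.eq_or_lt_of_le hk2 with rfl | hk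
            · exact hliNO
            · exact hcl k hk1 (by omega)
          obtain ⟨r1, r2, r3⟩ := ih (y + 1) g (by omega) (by omega) hg hcl'
          refine ⟨r1, r2, ?_⟩
          intro k hk1 hk2 hkcl hkS
          rcases Nat.eq_or_lt_of_le (by omega : y + 1 ≤ k) with rfl | hk
          · rcases hg.2.2 tx (y + 1) with h1 | ⟨_, _, hC⟩
            · rw [hkS] at h1; exact absurd h1 hS
            · exact r2 tx (y + 1) hC
          · exact r3 k (by omega) hk2 (fun r hr1 hr2 => hkcl r (by omega) hr2) hkS
    · have hstop : pvRight (tx : Int) (y : Int) g = g := by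
        rw [pvRight, dif_neg (by rw [hg.1]; omega)]
      rw [hstop]
      exact ⟨hg, fun _ _ h => h, fun k hk1 hk2 => absurd hk2 (by omega)⟩

-- processing one teacher marks everything it can see and preserves pvRel
lemma pvStep_spec (li : List (List String)) (n : Int)
    (hsq : ∀ r ∈ li, r.length = li.length) (tx ty : Nat) (ht : pvTeach li n tx ty)
    (g : List (List String)) (hg : pvRel li n g) :
    pvRel li n (pvRight (tx : Int) (ty : Int)
        (pvLeft (tx : Int) (ty : Int)
          (pvDown (ty : Int) (tx : Int) (pvUp (ty : Int) (tx : Int) g)))) ∧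
    pvMono g (pvRight (tx : Int) (ty : Int)
        (pvLeft (tx : Int) (ty : Int)
          (pvDown (ty : Int) (tx : Int) (pvUp (ty : Int) (tx : Int) g)))) ∧
    (∀ k, k < tx → pvColClear li ty k tx → pvCellN li k ty = "S" →
      pvCellN (pvRight (tx : Int) (ty : Int)
        (pvLeft (tx : Int) (ty : Int)
          (pvDown (ty : Int) (tx : Int) (pvUp (ty : Int) (tx : Int) g)))) k ty = "catch") ∧
    (∀ k, tx < k → k < li.length → pvColClear li ty tx k → pvCellN li k ty = "S" →
      pvCellN (pvRight (tx : Int) (ty : Int)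
        (pvLeft (tx : Int) (ty : Int)
          (pvDown (ty : Int) (tx : Int) (pvUp (ty : Int) (tx : Int) g)))) k ty = "catch") ∧
    (∀ k, k < ty → pvRowClear li tx k ty → pvCellN li tx k = "S" →
      pvCellN (pvRight (tx : Int) (ty : Int)
        (pvLeft (tx : Int) (ty : Int)
          (pvDown (ty : Int) (tx : Int) (pvUp (ty : Int) (tx : Int) g)))) tx k = "catch") ∧
    (∀ k, ty < k → k < li.length → pvRowClear li tx ty k → pvCellN li tx k = "S" →
      pvCellN (pvRight (tx : Int) (ty : Int)
        (pvLeft (tx : Int) (ty : Int)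
          (pvDown (ty : Int) (tx : Int) (pvUp (ty : Int) (tx : Int) g)))) tx k = "catch") := by
  obtain ⟨u1, u2, u3⟩ :=
    pvUp_spec li n hsq tx ty ht tx g (le_refl tx) hg (fun k h1 h2 => absurd h2 (by omega))
  obtain ⟨d1, d2, d3⟩ :=
    pvDown_spec li n hsq tx ty ht li.length tx _ (by omega) (le_refl tx) u1
      (fun k h1 h2 => absurd h2 (by omega))
  obtain ⟨l1, l2, l3⟩ :=
    pvLeft_spec li n hsq tx ty ht ty _ (le_refl ty) d1 (fun k h1 h2 => absurd h2 (by omega))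
  obtain ⟨r1, r2, r3⟩ :=
    pvRight_spec li n hsq tx ty ht li.length ty _ (by omega) (le_refl ty) l1
      (fun k h1 h2 => absurd h2 (by omega))
  refine ⟨r1, fun i j hc => r2 i j (l2 i j (d2 i j (u2 i j hc))), ?_, ?_, ?_, ?_⟩
  · intro k hk hcl hS
    exact r2 _ _ (l2 _ _ (d2 _ _ (u3 k hk (fun r h1 h2 => hcl r h1 h2) hS)))
  · intro k hk1 hk2 hcl hS
    exact r2 _ _ (l2 _ _ (d3 k hk1 hk2 (fun r h1 h2 => hcl r h1 h2) hS))
  · intro k hk hcl hS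
    exact r2 _ _ (l3 k hk (fun r h1 h2 => hcl r h1 h2) hS)
  · intro k hk1 hk2 hcl hS
    exact r3 k hk1 hk2 (fun r h1 h2 => hcl r h1 h2) hS

-- the teacher queue, as A builds it
def pvQ (li : List (List String)) (n : Int) : List (Int × Int) :=
  (PySem.List.pyRange 0 n 1).flatMap fun i =>
    ((PySem.List.pyRange 0 n 1).filter fun j => pvCell li i j == "T").map fun j => (i, j)

lemma pvA_eq_fold (li : List (List String)) (n : Int) :
    teacherWatchBFS li n =
      (pvQ li n).foldl
        (fun g p => pvRight p.1 p.2 (pvLeft p.1 p.2 (pvDown p.2 p.1 (pvUp p.2 p.1 g)))) li := by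
  unfold teacherWatchBFS pvQ
  simp only [PySem.List.foldl_append_if]
  rw [PySem.List.foldl_append_eq_flatMap]
  simp

lemma pvQ_mem (li : List (List String)) (n : Int) (p : Int × Int) :
    p ∈ pvQ li n ↔ ∃ a b : Nat, p = ((a : Int), (b : Int)) ∧ pvTeach li n a b := by
  simp only [pvQ, List.mem_flatMap, List.mem_map, List.mem_filter,
    PySem.List.mem_pyRange_one, beq_iff_eq]
  constructor
  · rintro ⟨i, ⟨hi0, hin⟩, j, ⟨⟨hj0, hjn⟩, hT⟩, rfl⟩
    refine ⟨i.toNat, j.toNat, by simp [Int.toNat_of_nonneg hi0, Int.toNat_of_nonneg hj0], ?_⟩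
    refine ⟨?_, by omega, by omega⟩
    rw [← pvCell_natCast]
    rwa [Int.toNat_of_nonneg hi0, Int.toNat_of_nonneg hj0]
  · rintro ⟨a, b, rfl, hT, han, hbn⟩
    exact ⟨a, ⟨by omega, han⟩, b, ⟨⟨by omega, hbn⟩, by rw [pvCell_natCast]; exact hT⟩, rfl⟩

-- folding over any list of teachers preserves pvRel and marks what each sees
lemma pvFold_spec (li : List (List String)) (n : Int)
    (hsq : ∀ r ∈ li, r.length = li.length) :
    ∀ (q : List (Int × Int)) (g : List (List String)),
      (∀ p ∈ q, ∃ a b : Nat, p = ((a : Int), (b : Int)) ∧ pvTeach li n a b) → pvRel li n g →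
      pvRel li n (q.foldl
        (fun g p => pvRight p.1 p.2 (pvLeft p.1 p.2 (pvDown p.2 p.1 (pvUp p.2 p.1 g)))) g) ∧
      pvMono g (q.foldl
        (fun g p => pvRight p.1 p.2 (pvLeft p.1 p.2 (pvDown p.2 p.1 (pvUp p.2 p.1 g)))) g) ∧
      (∀ tx ty : Nat, ((tx : Int), (ty : Int)) ∈ q →
        (∀ k, k < tx → pvColClear li ty k tx → pvCellN li k ty = "S" →
          pvCellN (q.foldl (fun g p =>
            pvRight p.1 p.2 (pvLeft p.1 p.2 (pvDown p.2 p.1 (pvUp p.2 p.1 g)))) g) k ty = "catch") ∧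
        (∀ k, tx < k → k < li.length → pvColClear li ty tx k → pvCellN li k ty = "S" →
          pvCellN (q.foldl (fun g p =>
            pvRight p.1 p.2 (pvLeft p.1 p.2 (pvDown p.2 p.1 (pvUp p.2 p.1 g)))) g) k ty = "catch") ∧
        (∀ k, k < ty → pvRowClear li tx k ty → pvCellN li tx k = "S" →
          pvCellN (q.foldl (fun g p =>
            pvRight p.1 p.2 (pvLeft p.1 p.2 (pvDown p.2 p.1 (pvUp p.2 p.1 g)))) g) tx k = "catch") ∧
        (∀ k, ty < k → k < li.length → pvRowClear li tx ty k → pvCellN li tx k = "S" →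
          pvCellN (q.foldl (fun g p =>
            pvRight p.1 p.2 (pvLeft p.1 p.2 (pvDown p.2 p.1 (pvUp p.2 p.1 g)))) g) tx k = "catch")) := by
  intro q
  induction q with
  | nil =>
    intro g _ hg
    exact ⟨hg, fun _ _ h => h, fun tx ty h => absurd h (List.not_mem_nil)⟩
  | cons p q ih =>
    intro g hq hg
    obtain ⟨a, b, rfl, hab⟩ := hq p (List.mem_cons_self)
    obtain ⟨s1, s2, sc1, sc2, sc3, sc4⟩ := pvStep_spec li n hsq a b hab g hg
    obtain ⟨f1, f2, f3⟩ := ih _ (fun p hp => hq p (List.mem_cons_of_mem _ hp)) s1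
    rw [List.foldl_cons]
    refine ⟨f1, fun i j hc => f2 i j (s2 i j hc), ?_⟩
    intro tx ty hmem
    rcases List.mem_cons.mp hmem with heq | hmem'
    · have hta : tx = a := by
        have := congrArg Prod.fst heq; simpa using this
      have htb : ty = b := by
        have := congrArg Prod.snd heq; simpa using this
      subst hta; subst htb
      exact ⟨fun k h1 h2 h3 => f2 _ _ (sc1 k h1 h2 h3),
        fun k h1 h2 h3 h4 => f2 _ _ (sc2 k h1 h2 h3 h4),
        fun k h1 h2 h3 => f2 _ _ (sc3 k h1 h2 h3),
        fun k h1 h2 h3 h4 => f2 _ _ (sc4 k h1 h2 h3 h4)⟩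
    · exact f3 tx ty hmem'

-- ---------- B's scan characterised ----------

lemma pvRowLen_natCast (li : List (List String)) (x : Nat) :
    pvRowLen li (x : Int) = ((li.getD x []).length : Int) := by
  simp [pvRowLen, List.getD_eq_getElem?_getD]

lemma pvSeenDir_teach (li : List (List String)) (n dx dy : Int) :
    ∀ (fuel : Nat) (x y : Int), pvSeenDir li n dx dy x y fuel = true →
      ∃ a b : Nat, pvTeach li n a b := by
  intro fuel
  induction fuel with
  | zero => intro x y h; rw [pvSeenDir] at h; exact absurd h (by decide)
  | succ f ih =>
    intro x y h
    rw [pvSeenDir] at h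
    by_cases h1 : 0 ≤ x ∧ x < (li.length : Int) ∧ 0 ≤ y ∧ y < pvRowLen li x
    · rw [if_pos h1] at h
      by_cases h2 : pvCell li x y = "T" ∧ x < n ∧ y < n
      · refine ⟨x.toNat, y.toNat, ?_, by omega, by omega⟩
        rw [← pvCell_natCast, Int.toNat_of_nonneg h1.1, Int.toNat_of_nonneg h1.2.2.1]
        exact h2.1
      · rw [if_neg h2] at h
        by_cases h3 : pvCell li x y = "O"
        · rw [if_pos h3] at h; exact absurd h (by decide)
        · rw [if_neg h3] at h; exact ih _ _ h
    · rw [if_neg h1] at h; exact absurd h (by decide)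

lemma pvSeen_teach (li : List (List String)) (n i j : Int)
    (h : pvSeen li n i j = true) : ∃ a b : Nat, pvTeach li n a b := by
  unfold pvSeen at h
  rcases List.any_eq_true.mp h with ⟨d, _, hd⟩
  exact pvSeenDir_teach li n d.1 d.2 _ _ _ hd

lemma pvScanUp (li : List (List String)) (n : Int)
    (hsq : ∀ r ∈ li, r.length = li.length) (j : Nat) (hj : j < li.length) :
    ∀ (k : Nat), k < li.length → ∀ (fuel : Nat), k + 2 ≤ fuel →
      (pvSeenDir li n (-1) 0 (k : Int) (j : Int) fuel = true ↔
        ∃ t, t ≤ k ∧ pvTeach li n t j ∧ (∀ r, t < r → r ≤ k → pvCellN li r j ≠ "O")) := by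
  intro k
  induction k with
  | zero =>
    intro hk fuel hf
    obtain ⟨f, rfl⟩ : ∃ f, fuel = f + 1 := ⟨fuel - 1, by omega⟩
    have hrl : pvRowLen li ((0 : Nat) : Int) = (li.length : Int) := by
      rw [pvRowLen_natCast, pvRowLen_sq li hsq 0 hk]
    have hcond : 0 ≤ ((0 : Nat) : Int) ∧ ((0 : Nat) : Int) < (li.length : Int) ∧
        0 ≤ (j : Int) ∧ (j : Int) < pvRowLen li ((0 : Nat) : Int) := by
      rw [hrl]; omega
    rw [pvSeenDir, if_pos hcond, pvCell_natCast]
    by_cases hT : pvCellN li 0 j = "T" ∧ ((0 : Nat) : Int) < n ∧ (j : Int) < n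
    · rw [if_pos hT]
      exact iff_of_true rfl ⟨0, le_refl 0, ⟨hT.1, hT.2.1, hT.2.2⟩, fun r h1 h2 => absurd h2 (by omega)⟩
    · rw [if_neg hT]
      by_cases hO : pvCellN li 0 j = "O"
      · rw [if_pos hO]
        refine iff_of_false (by decide) ?_
        rintro ⟨t, ht0, hteach, _⟩
        obtain rfl : t = 0 := by omega
        obtain ⟨h1, h2, h3⟩ := hteach
        rw [hO] at h1
        exact absurd h1 (by decide)
      · rw [if_neg hO]
        obtain ⟨f', rfl⟩ : ∃ f', f = f' + 1 := ⟨f - 1, by omega⟩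
        have hx : ((0 : Nat) : Int) + -1 = (-1 : Int) := by omega
        have hy : (j : Int) + 0 = (j : Int) := by omega
        rw [hx, hy, pvSeenDir]
        rw [if_neg (show ¬(0 ≤ (-1 : Int) ∧ (-1 : Int) < (li.length : Int) ∧
            0 ≤ (j : Int) ∧ (j : Int) < pvRowLen li (-1 : Int)) from
          fun hc => absurd hc.1 (by omega))]
        refine iff_of_false (by decide) ?_
        rintro ⟨t, ht0, hteach, _⟩
        obtain rfl : t = 0 := by omega
        obtain ⟨h1, h2, h3⟩ := hteach
        exact hT ⟨h1, h2, h3⟩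
  | succ k ih =>
    intro hk fuel hf
    obtain ⟨f, rfl⟩ : ∃ f, fuel = f + 1 := ⟨fuel - 1, by omega⟩
    have hrl : pvRowLen li ((k + 1 : Nat) : Int) = (li.length : Int) := by
      rw [pvRowLen_natCast, pvRowLen_sq li hsq (k + 1) hk]
    have hcond : 0 ≤ ((k + 1 : Nat) : Int) ∧ ((k + 1 : Nat) : Int) < (li.length : Int) ∧
        0 ≤ (j : Int) ∧ (j : Int) < pvRowLen li ((k + 1 : Nat) : Int) := by
      rw [hrl]; omega
    rw [pvSeenDir, if_pos hcond, pvCell_natCast]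
    by_cases hT : pvCellN li (k + 1) j = "T" ∧ ((k + 1 : Nat) : Int) < n ∧ (j : Int) < n
    · rw [if_pos hT]
      exact iff_of_true rfl ⟨k + 1, le_refl _, ⟨hT.1, hT.2.1, hT.2.2⟩, fun r h1 h2 => absurd h2 (by omega)⟩
    · rw [if_neg hT]
      have hTN : ¬ pvTeach li n (k + 1) j := fun hteach => hT ⟨hteach.1, hteach.2.1, hteach.2.2⟩
      by_cases hO : pvCellN li (k + 1) j = "O"
      · rw [if_pos hO]
        refine iff_of_false (by decide) ?_
        rintro ⟨t, ht0, hteach, hclear⟩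
        rcases Nat.eq_or_lt_of_le ht0 with rfl | ht
        · obtain ⟨h1, _, _⟩ := hteach
          rw [hO] at h1
          exact absurd h1 (by decide)
        · exact hclear (k + 1) (by omega) (le_refl _) hO
      · rw [if_neg hO]
        have hx : ((k + 1 : Nat) : Int) + -1 = ((k : Nat) : Int) := by omega
        have hy : (j : Int) + 0 = (j : Int) := by omega
        rw [hx, hy, ih (by omega) f (by omega)]
        constructor
        · rintro ⟨t, ht, hteach, hclear⟩
          refine ⟨t, by omega, hteach, fun r h1 h2 => ?_⟩
          rcases Nat.eq_or_lt_of_le h2 with rfl | hr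
          · exact hO
          · exact hclear r h1 (by omega)
        · rintro ⟨t, ht, hteach, hclear⟩
          rcases Nat.eq_or_lt_of_le ht with rfl | ht'
          · exact absurd hteach hTN
          · exact ⟨t, by omega, hteach, fun r h1 h2 => hclear r h1 (by omega)⟩

lemma pvScanDown (li : List (List String)) (n : Int)
    (hsq : ∀ r ∈ li, r.length = li.length) (j : Nat) (hj : j < li.length) :
    ∀ (d k fuel : Nat), li.length - k ≤ d → d + 1 ≤ fuel →
      (pvSeenDir li n 1 0 (k : Int) (j : Int) fuel = true ↔
        ∃ t, k ≤ t ∧ t < li.length ∧ pvTeach li n t j ∧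
          (∀ r, k ≤ r → r < t → pvCellN li r j ≠ "O")) := by
  intro d
  induction d with
  | zero =>
    intro k fuel hd hf
    obtain ⟨f, rfl⟩ : ∃ f, fuel = f + 1 := ⟨fuel - 1, by omega⟩
    rw [pvSeenDir]
    rw [if_neg (show ¬(0 ≤ ((k : Nat) : Int) ∧ ((k : Nat) : Int) < (li.length : Int) ∧
        0 ≤ (j : Int) ∧ (j : Int) < pvRowLen li ((k : Nat) : Int)) from
      fun hc => absurd hc.2.1 (by omega))]
    refine iff_of_false (by decide) ?_
    rintro ⟨t, ht1, ht2, _⟩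
    omega
  | succ d ih =>
    intro k fuel hd hf
    obtain ⟨f, rfl⟩ : ∃ f, fuel = f + 1 := ⟨fuel - 1, by omega⟩
    by_cases hk : k < li.length
    · have hrl : pvRowLen li ((k : Nat) : Int) = (li.length : Int) := by
        rw [pvRowLen_natCast, pvRowLen_sq li hsq k hk]
      have hcond : 0 ≤ ((k : Nat) : Int) ∧ ((k : Nat) : Int) < (li.length : Int) ∧
          0 ≤ (j : Int) ∧ (j : Int) < pvRowLen li ((k : Nat) : Int) := by
        rw [hrl]; omega
      rw [pvSeenDir, if_pos hcond, pvCell_natCast]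
      by_cases hT : pvCellN li k j = "T" ∧ ((k : Nat) : Int) < n ∧ (j : Int) < n
      · rw [if_pos hT]
        exact iff_of_true rfl ⟨k, le_refl _, hk, ⟨hT.1, hT.2.1, hT.2.2⟩, fun r h1 h2 => absurd h2 (by omega)⟩
      · rw [if_neg hT]
        have hTN : ¬ pvTeach li n k j := fun hteach => hT ⟨hteach.1, hteach.2.1, hteach.2.2⟩
        by_cases hO : pvCellN li k j = "O"
        · rw [if_pos hO]
          refine iff_of_false (by decide) ?_
          rintro ⟨t, ht0, htm, hteach, hclear⟩
          rcases Nat.eq_or_lt_of_le ht0 with rfl | ht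
          · obtain ⟨h1, _, _⟩ := hteach
            rw [hO] at h1
            exact absurd h1 (by decide)
          · exact hclear k (le_refl _) ht hO
        · rw [if_neg hO]
          have hx : ((k : Nat) : Int) + 1 = ((k + 1 : Nat) : Int) := by omega
          have hy : (j : Int) + 0 = (j : Int) := by omega
          rw [hx, hy, ih (k + 1) f (by omega) (by omega)]
          constructor
          · rintro ⟨t, ht, htm, hteach, hclear⟩
            refine ⟨t, by omega, htm, hteach, fun r h1 h2 => ?_⟩
            rcases Nat.eq_or_lt_of_le h1 with rfl | hr
            · exact hO
            · exact hclear r (by omega) h2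
          · rintro ⟨t, ht, htm, hteach, hclear⟩
            rcases Nat.eq_or_lt_of_le ht with rfl | ht'
            · exact absurd hteach hTN
            · exact ⟨t, by omega, htm, hteach, fun r h1 h2 => hclear r (by omega) h2⟩
    · rw [pvSeenDir]
      rw [if_neg (show ¬(0 ≤ ((k : Nat) : Int) ∧ ((k : Nat) : Int) < (li.length : Int) ∧
          0 ≤ (j : Int) ∧ (j : Int) < pvRowLen li ((k : Nat) : Int)) from
        fun hc => absurd hc.2.1 (by omega))]
      refine iff_of_false (by decide) ?_
      rintro ⟨t, ht1, ht2, _⟩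
      omega

lemma pvScanLeft (li : List (List String)) (n : Int)
    (hsq : ∀ r ∈ li, r.length = li.length) (i : Nat) (hi : i < li.length) :
    ∀ (k : Nat), k < li.length → ∀ (fuel : Nat), k + 2 ≤ fuel →
      (pvSeenDir li n 0 (-1) (i : Int) (k : Int) fuel = true ↔
        ∃ t, t ≤ k ∧ pvTeach li n i t ∧ (∀ r, t < r → r ≤ k → pvCellN li i r ≠ "O")) := by
  have hrl : pvRowLen li ((i : Nat) : Int) = (li.length : Int) := by
    rw [pvRowLen_natCast, pvRowLen_sq li hsq i hi]
  intro k
  induction k with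
  | zero =>
    intro hk fuel hf
    obtain ⟨f, rfl⟩ : ∃ f, fuel = f + 1 := ⟨fuel - 1, by omega⟩
    have hcond : 0 ≤ ((i : Nat) : Int) ∧ ((i : Nat) : Int) < (li.length : Int) ∧
        0 ≤ ((0 : Nat) : Int) ∧ ((0 : Nat) : Int) < pvRowLen li ((i : Nat) : Int) := by
      rw [hrl]; omega
    rw [pvSeenDir, if_pos hcond, pvCell_natCast]
    by_cases hT : pvCellN li i 0 = "T" ∧ ((i : Nat) : Int) < n ∧ ((0 : Nat) : Int) < n
    · rw [if_pos hT]
      exact iff_of_true rfl ⟨0, le_refl 0, ⟨hT.1, hT.2.1, hT.2.2⟩, fun r h1 h2 => absurd h2 (by omega)⟩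
    · rw [if_neg hT]
      by_cases hO : pvCellN li i 0 = "O"
      · rw [if_pos hO]
        refine iff_of_false (by decide) ?_
        rintro ⟨t, ht0, hteach, _⟩
        obtain rfl : t = 0 := by omega
        obtain ⟨h1, h2, h3⟩ := hteach
        rw [hO] at h1
        exact absurd h1 (by decide)
      · rw [if_neg hO]
        obtain ⟨f', rfl⟩ : ∃ f', f = f' + 1 := ⟨f - 1, by omega⟩
        have hx : ((i : Nat) : Int) + 0 = ((i : Nat) : Int) := by omega
        have hy : ((0 : Nat) : Int) + -1 = (-1 : Int) := by omega
        rw [hx, hy, pvSeenDir]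
        rw [if_neg (show ¬(0 ≤ ((i : Nat) : Int) ∧ ((i : Nat) : Int) < (li.length : Int) ∧
            0 ≤ (-1 : Int) ∧ (-1 : Int) < pvRowLen li ((i : Nat) : Int)) from
          fun hc => absurd hc.2.2.1 (by omega))]
        refine iff_of_false (by decide) ?_
        rintro ⟨t, ht0, hteach, _⟩
        obtain rfl : t = 0 := by omega
        obtain ⟨h1, h2, h3⟩ := hteach
        exact hT ⟨h1, h2, h3⟩
  | succ k ih =>
    intro hk fuel hf
    obtain ⟨f, rfl⟩ : ∃ f, fuel = f + 1 := ⟨fuel - 1, by omega⟩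
    have hcond : 0 ≤ ((i : Nat) : Int) ∧ ((i : Nat) : Int) < (li.length : Int) ∧
        0 ≤ ((k + 1 : Nat) : Int) ∧ ((k + 1 : Nat) : Int) < pvRowLen li ((i : Nat) : Int) := by
      rw [hrl]; omega
    rw [pvSeenDir, if_pos hcond, pvCell_natCast]
    by_cases hT : pvCellN li i (k + 1) = "T" ∧ ((i : Nat) : Int) < n ∧ ((k + 1 : Nat) : Int) < n
    · rw [if_pos hT]
      exact iff_of_true rfl ⟨k + 1, le_refl _, ⟨hT.1, hT.2.1, hT.2.2⟩, fun r h1 h2 => absurd h2 (by omega)⟩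
    · rw [if_neg hT]
      have hTN : ¬ pvTeach li n i (k + 1) := fun hteach => hT ⟨hteach.1, hteach.2.1, hteach.2.2⟩
      by_cases hO : pvCellN li i (k + 1) = "O"
      · rw [if_pos hO]
        refine iff_of_false (by decide) ?_
        rintro ⟨t, ht0, hteach, hclear⟩
        rcases Nat.eq_or_lt_of_le ht0 with rfl | ht
        · obtain ⟨h1, _, _⟩ := hteach
          rw [hO] at h1
          exact absurd h1 (by decide)
        · exact hclear (k + 1) (by omega) (le_refl _) hO
      · rw [if_neg hO]
        have hx : ((i : Nat) : Int) + 0 = ((i : Nat) : Int) := by omega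
        have hy : ((k + 1 : Nat) : Int) + -1 = ((k : Nat) : Int) := by omega
        rw [hx, hy, ih (by omega) f (by omega)]
        constructor
        · rintro ⟨t, ht, hteach, hclear⟩
          refine ⟨t, by omega, hteach, fun r h1 h2 => ?_⟩
          rcases Nat.eq_or_lt_of_le h2 with rfl | hr
          · exact hO
          · exact hclear r h1 (by omega)
        · rintro ⟨t, ht, hteach, hclear⟩
          rcases Nat.eq_or_lt_of_le ht with rfl | ht'
          · exact absurd hteach hTN
          · exact ⟨t, by omega, hteach, fun r h1 h2 => hclear r h1 (by omega)⟩

lemma pvScanRight (li : List (List String)) (n : Int)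
    (hsq : ∀ r ∈ li, r.length = li.length) (i : Nat) (hi : i < li.length) :
    ∀ (d k fuel : Nat), li.length - k ≤ d → d + 1 ≤ fuel →
      (pvSeenDir li n 0 1 (i : Int) (k : Int) fuel = true ↔
        ∃ t, k ≤ t ∧ t < li.length ∧ pvTeach li n i t ∧
          (∀ r, k ≤ r → r < t → pvCellN li i r ≠ "O")) := by
  have hrl : pvRowLen li ((i : Nat) : Int) = (li.length : Int) := by
    rw [pvRowLen_natCast, pvRowLen_sq li hsq i hi]
  intro d
  induction d with
  | zero =>
    intro k fuel hd hf
    obtain ⟨f, rfl⟩ : ∃ f, fuel = f + 1 := ⟨fuel - 1, by omega⟩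
    rw [pvSeenDir]
    rw [if_neg (show ¬(0 ≤ ((i : Nat) : Int) ∧ ((i : Nat) : Int) < (li.length : Int) ∧
        0 ≤ ((k : Nat) : Int) ∧ ((k : Nat) : Int) < pvRowLen li ((i : Nat) : Int)) from
      fun hc => by rw [hrl] at hc; exact absurd hc.2.2.2 (by omega))]
    refine iff_of_false (by decide) ?_
    rintro ⟨t, ht1, ht2, _⟩
    omega
  | succ d ih =>
    intro k fuel hd hf
    obtain ⟨f, rfl⟩ : ∃ f, fuel = f + 1 := ⟨fuel - 1, by omega⟩
    by_cases hk : k < li.length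
    · have hcond : 0 ≤ ((i : Nat) : Int) ∧ ((i : Nat) : Int) < (li.length : Int) ∧
          0 ≤ ((k : Nat) : Int) ∧ ((k : Nat) : Int) < pvRowLen li ((i : Nat) : Int) := by
        rw [hrl]; omega
      rw [pvSeenDir, if_pos hcond, pvCell_natCast]
      by_cases hT : pvCellN li i k = "T" ∧ ((i : Nat) : Int) < n ∧ ((k : Nat) : Int) < n
      · rw [if_pos hT]
        exact iff_of_true rfl ⟨k, le_refl _, hk, ⟨hT.1, hT.2.1, hT.2.2⟩, fun r h1 h2 => absurd h2 (by omega)⟩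
      · rw [if_neg hT]
        have hTN : ¬ pvTeach li n i k := fun hteach => hT ⟨hteach.1, hteach.2.1, hteach.2.2⟩
        by_cases hO : pvCellN li i k = "O"
        · rw [if_pos hO]
          refine iff_of_false (by decide) ?_
          rintro ⟨t, ht0, htm, hteach, hclear⟩
          rcases Nat.eq_or_lt_of_le ht0 with rfl | ht
          · obtain ⟨h1, _, _⟩ := hteach
            rw [hO] at h1
            exact absurd h1 (by decide)
          · exact hclear k (le_refl _) ht hO
        · rw [if_neg hO]
          have hx : ((i : Nat) : Int) + 0 = ((i : Nat) : Int) := by omega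
          have hy : ((k : Nat) : Int) + 1 = ((k + 1 : Nat) : Int) := by omega
          rw [hx, hy, ih (k + 1) f (by omega) (by omega)]
          constructor
          · rintro ⟨t, ht, htm, hteach, hclear⟩
            refine ⟨t, by omega, htm, hteach, fun r h1 h2 => ?_⟩
            rcases Nat.eq_or_lt_of_le h1 with rfl | hr
            · exact hO
            · exact hclear r (by omega) h2
          · rintro ⟨t, ht, htm, hteach, hclear⟩
            rcases Nat.eq_or_lt_of_le ht with rfl | ht'
            · exact absurd hteach hTN
            · exact ⟨t, by omega, htm, hteach, fun r h1 h2 => hclear r (by omega) h2⟩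
    · rw [pvSeenDir]
      rw [if_neg (show ¬(0 ≤ ((i : Nat) : Int) ∧ ((i : Nat) : Int) < (li.length : Int) ∧
          0 ≤ ((k : Nat) : Int) ∧ ((k : Nat) : Int) < pvRowLen li ((i : Nat) : Int)) from
        fun hc => by rw [hrl] at hc; exact absurd hc.2.2.2 (by omega))]
      refine iff_of_false (by decide) ?_
      rintro ⟨t, ht1, ht2, _⟩
      omega

lemma pvFuel_ge (li : List (List String)) : li.length + 1 ≤ pvFuel li := by
  unfold pvFuel; omega

lemma pvSeen_iff_vis (li : List (List String)) (n : Int)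
    (hsq : ∀ r ∈ li, r.length = li.length) (i j : Nat)
    (hi : i < li.length) (hj : j < li.length) :
    pvSeen li n (i : Int) (j : Int) = true ↔ pvVis li n i j := by
  have hfuel := pvFuel_ge li
  have hup : pvSeenDir li n (-1) 0 ((i : Int) + -1) ((j : Int) + 0) (pvFuel li) = true ↔
      (∃ t, t < i ∧ pvTeach li n t j ∧ pvColClear li j t i) := by
    rcases Nat.eq_zero_or_pos i with rfl | hpos
    · have hx : ((0 : Nat) : Int) + -1 = (-1 : Int) := by omega
      have hy : (j : Int) + 0 = (j : Int) := by omega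
      rw [hx, hy]
      obtain ⟨f, hfe⟩ : ∃ f, pvFuel li = f + 1 := ⟨pvFuel li - 1, by omega⟩
      rw [hfe, pvSeenDir]
      rw [if_neg (show ¬(0 ≤ (-1 : Int) ∧ (-1 : Int) < (li.length : Int) ∧
          0 ≤ (j : Int) ∧ (j : Int) < pvRowLen li (-1 : Int)) from
        fun hc => absurd hc.1 (by omega))]
      constructor
      · intro h; exact absurd h (by simp)
      · rintro ⟨t, ht, _⟩; omega
    · have hx : (i : Int) + -1 = ((i - 1 : Nat) : Int) := by omega
      have hy : (j : Int) + 0 = (j : Int) := by omega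
      rw [hx, hy, pvScanUp li n hsq j hj (i - 1) (by omega) (pvFuel li) (by omega)]
      constructor
      · rintro ⟨t, ht, hteach, hclear⟩
        exact ⟨t, by omega, hteach, fun r h1 h2 => hclear r h1 (by omega)⟩
      · rintro ⟨t, ht, hteach, hclear⟩
        exact ⟨t, by omega, hteach, fun r h1 h2 => hclear r h1 (by omega)⟩
  have hdown : pvSeenDir li n 1 0 ((i : Int) + 1) ((j : Int) + 0) (pvFuel li) = true ↔
      (∃ t, i < t ∧ t < li.length ∧ pvTeach li n t j ∧ pvColClear li j i t) := by
    have hx : (i : Int) + 1 = ((i + 1 : Nat) : Int) := by omega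
    have hy : (j : Int) + 0 = (j : Int) := by omega
    rw [hx, hy, pvScanDown li n hsq j hj (li.length - (i + 1)) (i + 1) (pvFuel li) (by omega)
      (by omega)]
    constructor
    · rintro ⟨t, ht, htm, hteach, hclear⟩
      exact ⟨t, by omega, htm, hteach, fun r h1 h2 => hclear r (by omega) h2⟩
    · rintro ⟨t, ht, htm, hteach, hclear⟩
      exact ⟨t, by omega, htm, hteach, fun r h1 h2 => hclear r (by omega) h2⟩
  have hleft : pvSeenDir li n 0 (-1) ((i : Int) + 0) ((j : Int) + -1) (pvFuel li) = true ↔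
      (∃ t, t < j ∧ pvTeach li n i t ∧ pvRowClear li i t j) := by
    rcases Nat.eq_zero_or_pos j with rfl | hpos
    · have hx : (i : Int) + 0 = (i : Int) := by omega
      have hy : ((0 : Nat) : Int) + -1 = (-1 : Int) := by omega
      rw [hx, hy]
      obtain ⟨f, hfe⟩ : ∃ f, pvFuel li = f + 1 := ⟨pvFuel li - 1, by omega⟩
      rw [hfe, pvSeenDir]
      rw [if_neg (show ¬(0 ≤ (i : Int) ∧ (i : Int) < (li.length : Int) ∧
          0 ≤ (-1 : Int) ∧ (-1 : Int) < pvRowLen li (i : Int)) from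
        fun hc => absurd hc.2.2.1 (by omega))]
      constructor
      · intro h; exact absurd h (by simp)
      · rintro ⟨t, ht, _⟩; omega
    · have hx : (i : Int) + 0 = (i : Int) := by omega
      have hy : (j : Int) + -1 = ((j - 1 : Nat) : Int) := by omega
      rw [hx, hy, pvScanLeft li n hsq i hi (j - 1) (by omega) (pvFuel li) (by omega)]
      constructor
      · rintro ⟨t, ht, hteach, hclear⟩
        exact ⟨t, by omega, hteach, fun r h1 h2 => hclear r h1 (by omega)⟩
      · rintro ⟨t, ht, hteach, hclear⟩
        exact ⟨t, by omega, hteach, fun r h1 h2 => hclear r h1 (by omega)⟩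
  have hright : pvSeenDir li n 0 1 ((i : Int) + 0) ((j : Int) + 1) (pvFuel li) = true ↔
      (∃ t, j < t ∧ t < li.length ∧ pvTeach li n i t ∧ pvRowClear li i j t) := by
    have hx : (i : Int) + 0 = (i : Int) := by omega
    have hy : (j : Int) + 1 = ((j + 1 : Nat) : Int) := by omega
    rw [hx, hy, pvScanRight li n hsq i hi (li.length - (j + 1)) (j + 1) (pvFuel li) (by omega)
      (by omega)]
    constructor
    · rintro ⟨t, ht, htm, hteach, hclear⟩
      exact ⟨t, by omega, htm, hteach, fun r h1 h2 => hclear r (by omega) h2⟩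
    · rintro ⟨t, ht, htm, hteach, hclear⟩
      exact ⟨t, by omega, htm, hteach, fun r h1 h2 => hclear r (by omega) h2⟩
  have hexp : pvSeen li n (i : Int) (j : Int) =
      (pvSeenDir li n (-1) 0 ((i : Int) + -1) ((j : Int) + 0) (pvFuel li) ||
        (pvSeenDir li n 1 0 ((i : Int) + 1) ((j : Int) + 0) (pvFuel li) ||
          (pvSeenDir li n 0 (-1) ((i : Int) + 0) ((j : Int) + -1) (pvFuel li) ||
            (pvSeenDir li n 0 1 ((i : Int) + 0) ((j : Int) + 1) (pvFuel li) || false)))) := rfl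
  rw [hexp]
  simp only [Bool.or_false, Bool.or_eq_true]
  rw [hup, hdown, hleft, hright]
  exact Iff.rfl

-- ---------- B's output, cell by cell ----------

lemma pvAlt_length (li : List (List String)) (n : Int) :
    (teacherWatchBFS_alt li n).length = li.length := by
  simp [teacherWatchBFS_alt, PySem.List.length_enumerate]

lemma pvAlt_row (li : List (List String)) (n : Int) (i : Nat) :
    ((teacherWatchBFS_alt li n).getD i []).length = (li.getD i []).length := by
  rcases h : li[i]? with _ | r <;>
    simp [teacherWatchBFS_alt, List.getD_eq_getElem?_getD, PySem.List.getElem?_enumerate, h,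
      PySem.List.length_enumerate]

lemma pvAlt_cell (li : List (List String)) (n : Int) (i j : Nat) :
    pvCellN (teacherWatchBFS_alt li n) i j =
      if pvCellN li i j = "S" ∧ pvSeen li n (i : Int) (j : Int) = true then "catch"
      else pvCellN li i j := by
  by_cases hb : i < li.length ∧ j < (li.getD i []).length
  · obtain ⟨hi, hj⟩ := hb
    have hri : li[i]? = some li[i] := List.getElem?_eq_getElem hi
    have hrow : li.getD i [] = li[i] := by simp [List.getD_eq_getElem?_getD, hri]
    have hj' : j < li[i].length := by rw [← hrow]; exact hj
    have hrj : li[i][j]? = some li[i][j] := List.getElem?_eq_getElem hj'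
    simp only [pvCellN, teacherWatchBFS_alt, List.getD_eq_getElem?_getD, List.getElem?_map,
      PySem.List.getElem?_enumerate, hri, hrj, Option.map_some, Option.getD_some, zero_add]
  · have hout := pvCellN_out li i j hb
    have hout2 : pvCellN (teacherWatchBFS_alt li n) i j = "" := by
      apply pvCellN_out
      rw [pvAlt_length, pvAlt_row]
      exact hb
    rw [hout, hout2]
    simp

-- ===== VERDICT (by name: the statement is the Claim_ definition above) =====
theorem teacherWatchBFS_spec : Claim_equal_teacherWatchBFS := by
  intro li n _ hpre
  obtain ⟨hn, hscan, hsqc⟩ := hpre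
  show teacherWatchBFS li n = teacherWatchBFS_alt li n
  by_cases hT : ∃ a b : Nat, pvTeach li n a b
  · -- a watched teacher exists: the grid is square by Pre_
    obtain ⟨a0, b0, ht0⟩ := hT
    have ha0 : a0 < n.toNat := by have := ht0.2.1; omega
    have hb0 : b0 < n.toNat := by have := ht0.2.2; omega
    have hsq : ∀ r ∈ li, r.length = li.length := hsqc a0 ha0 b0 hb0 ht0.1
    rw [pvA_eq_fold]
    obtain ⟨hrel, hmono, hcompl⟩ :=
      pvFold_spec li n hsq (pvQ li n) li
        (fun p hp => (pvQ_mem li n p).mp hp) (pvRel_refl li n)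
    apply pvGridExt
    · rw [hrel.1, pvAlt_length]
    · intro i; rw [hrel.2.1 i, pvAlt_row]
    · intro i j
      rw [pvAlt_cell]
      by_cases hb : i < li.length ∧ j < (li.getD i []).length
      · obtain ⟨hi, hj⟩ := hb
        have hjm : j < li.length := by
          rw [pvRowLen_sq li hsq i hi] at hj; exact hj
        have hvis := pvSeen_iff_vis li n hsq i j hi hjm
        by_cases hSV : pvCellN li i j = "S" ∧ pvVis li n i j
        · rw [if_pos ⟨hSV.1, hvis.mpr hSV.2⟩]
          obtain ⟨hS, hV⟩ := hSV
          rcases hV with ⟨t, ht, hteach, hclear⟩ | ⟨t, ht, htm, hteach, hclear⟩ |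
            ⟨t, ht, hteach, hclear⟩ | ⟨t, ht, htm, hteach, hclear⟩
          · have hmem : ((t : Int), (j : Int)) ∈ pvQ li n :=
              (pvQ_mem li n _).mpr ⟨t, j, rfl, hteach⟩
            exact (hcompl t j hmem).2.1 i ht hi hclear hS
          · have hmem : ((t : Int), (j : Int)) ∈ pvQ li n :=
              (pvQ_mem li n _).mpr ⟨t, j, rfl, hteach⟩
            exact (hcompl t j hmem).1 i ht hclear hS
          · have hmem : ((i : Int), (t : Int)) ∈ pvQ li n :=
              (pvQ_mem li n _).mpr ⟨i, t, rfl, hteach⟩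
            exact (hcompl i t hmem).2.2.2 j ht hjm hclear hS
          · have hmem : ((i : Int), (t : Int)) ∈ pvQ li n :=
              (pvQ_mem li n _).mpr ⟨i, t, rfl, hteach⟩
            exact (hcompl i t hmem).2.2.1 j ht hclear hS
        · rw [if_neg (fun hc => hSV ⟨hc.1, hvis.mp hc.2⟩)]
          rcases hrel.2.2 i j with h1 | ⟨hS, hV, _⟩
          · exact h1
          · exact absurd ⟨hS, hV⟩ hSV
      · have hout := pvCellN_out li i j hb
        have hout2 : pvCellN ((pvQ li n).foldl (fun g p =>
            pvRight p.1 p.2 (pvLeft p.1 p.2 (pvDown p.2 p.1 (pvUp p.2 p.1 g)))) li) i j = "" := by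
          apply pvCellN_out
          rw [hrel.1, hrel.2.1 i]
          exact hb
        rw [hout, hout2, if_neg (show ¬(("" : String) = "S" ∧ pvSeen li n (i : Int) (j : Int) = true) from
          fun hc => absurd hc.1 (by decide))]
  · -- no watched teacher: both sides return the grid unchanged
    have hq : pvQ li n = [] := by
      rw [List.eq_nil_iff_forall_not_mem]
      intro p hp
      obtain ⟨a, b, _, hab⟩ := (pvQ_mem li n p).mp hp
      exact hT ⟨a, b, hab⟩
    rw [pvA_eq_fold, hq, List.foldl_nil]
    symm
    apply pvGridExt
    · exact pvAlt_length li n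
    · exact pvAlt_row li n
    · intro i j
      rw [pvAlt_cell]
      rw [if_neg]
      rintro ⟨_, hseen⟩
      exact hT (pvSeen_teach li n _ _ hseen)
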